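-- pv_equiv track=rewrite | github.com/takamasa1999/3d_network_analyzer | back_end/py/plotter.py | ReferDictAddColumn
-- ===== SOURCE A (Python) =====
-- def GetColumn(list_data, col_num):
--     arr = []
--     for row in list_data:
--         arr.append(row[col_num])
--     return(arr)
--
-- def ReferDictAddColumn(list_data, col_num, ref_dict):
--     col_list = GetColumn(list_data, col_num)
--     i = 0
--     for elem in col_list:
--         try:
--             elem_pos = ref_dict[elem]
--             list_data[i].append(elem_pos)
--             i = i + 1
--         except Exception as e:
--             i = i + 1
--             pass
--     return(list_data)
-- ===== SOURCE B (Python) =====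
-- def ReferDictAddColumn(list_data, col_num, ref_dict):
--     # Inverted index: bucket the row indices by their key column in one pass,
--     # then drive the loop over ref_dict itself, appending each mapped value to
--     # every row in its bucket (each row has one key, so at most one append).
--     buckets = {}
--     for i, row in enumerate(list_data):
--         buckets.setdefault(row[col_num], []).append(i)
--     for key, val in ref_dict.items():
--         for i in buckets.get(key, ()):
--             list_data[i].append(val)
--     return list_data
-- ===== Notes on version B (the rewrite author's own statement) =====
-- stated objective: alternative
-- what changed: Replaces A's scheme (materialize the column with GetColumn, then re-walk it with a manual index and try/except around each per-row dict lookup) with an inverted index: one pass buckets row indices by key-column value, then the loop is driven by ref_dict.items(), appending each dict value to all rows in its bucket, so there is no per-row dict lookup and no try/except.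
import Mathlib
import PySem

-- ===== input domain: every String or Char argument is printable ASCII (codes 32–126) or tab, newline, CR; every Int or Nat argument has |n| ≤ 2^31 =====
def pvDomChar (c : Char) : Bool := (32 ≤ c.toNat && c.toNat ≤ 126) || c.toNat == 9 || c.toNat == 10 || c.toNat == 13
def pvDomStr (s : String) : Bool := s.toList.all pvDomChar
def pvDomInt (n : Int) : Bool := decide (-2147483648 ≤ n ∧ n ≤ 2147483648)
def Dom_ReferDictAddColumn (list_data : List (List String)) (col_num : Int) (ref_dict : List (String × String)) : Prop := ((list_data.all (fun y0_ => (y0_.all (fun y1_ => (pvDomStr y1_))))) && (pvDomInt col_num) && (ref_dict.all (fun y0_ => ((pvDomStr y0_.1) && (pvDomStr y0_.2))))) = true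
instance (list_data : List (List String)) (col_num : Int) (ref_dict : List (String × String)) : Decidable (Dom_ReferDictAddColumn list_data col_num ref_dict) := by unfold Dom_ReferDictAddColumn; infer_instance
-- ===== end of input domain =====

-- B replaces A's column-then-indexed-try/except scheme with an inverted index (bucket row
-- indices by key, then loop over ref_dict) — objective: alternative. Both Pythons mutate the
-- rows of list_data in place identically; the equivalence proved here is about the RETURN value.

-- ===== PORT A =====
-- GetColumn: 'arr = []; for row in list_data: arr.append(row[col_num])'; none = IndexError propagates
def pvGetColAux (list_data : List (List String)) (col_num : Int) (arr : List String) : Option (List String) :=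
  match list_data with
  | [] => some arr
  | row :: rest =>
    match PySem.List.pyGet? row col_num with
    | none => none
    | some e => pvGetColAux rest col_num (arr ++ [e])

-- the 'for elem in col_list' loop with manual index i; except-branches just advance i
def pvLoopA (ref_dict : PySem.Dict String String) (st : List (List String)) (i : Int) (col_list : List String) : List (List String) :=
  match col_list with
  | [] => st
  | e :: rest =>
    match ref_dict.get? e with
    | none => pvLoopA ref_dict st (i + 1) rest          -- KeyError caught by except
    | some v =>
      match PySem.List.pyGet? st i with
      | none => pvLoopA ref_dict st (i + 1) rest        -- IndexError caught by except
      | some row => pvLoopA ref_dict (PySem.List.pySetD st i (row ++ [v])) (i + 1) rest  -- list_data[i].append(v)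

def ReferDictAddColumn (list_data : List (List String)) (col_num : Int) (ref_dict : List (String × String)) : List (List String) :=
  match pvGetColAux list_data col_num [] with
  | none => list_data   -- unreached under Pre_: Python raises IndexError in GetColumn here
  | some col_list => pvLoopA (PySem.Dict.mk ref_dict) list_data 0 col_list

-- ===== PORT B =====
-- stage 1: 'buckets = {}; for i, row in enumerate(list_data): buckets.setdefault(row[col_num], []).append(i)'
-- (setdefault-then-append is exactly Dict.modify with default []); none = IndexError propagates
def pvBucketsB (pairs : List (Int × List String)) (col_num : Int)
    (b : PySem.Dict String (List Int)) : Option (PySem.Dict String (List Int)) :=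
  match pairs with
  | [] => some b
  | (i, row) :: rest =>
    match PySem.List.pyGet? row col_num with
    | none => none
    | some k => pvBucketsB rest col_num (b.modify k [] (· ++ [i]))

-- inner loop: 'for i in buckets.get(key, ()): list_data[i].append(val)' — in-place append at index i
def pvInnerB (S : List Int) (v : String) (st : List (List String)) : List (List String) :=
  S.foldl (fun st i => PySem.List.pySetD st i (PySem.List.pyGetD st i [] ++ [v])) st

-- ref_dict arrives as an association list; Python's dict has unique keys, so '.items()' is the
-- first-occurrence view, built by a setdefault fold (first match, consistent with get?)
def pvItemsB (ref_dict : List (String × String)) : List (String × String) :=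
  (ref_dict.foldl (fun d p => d.setdefault p.1 p.2) PySem.Dict.empty).items

def ReferDictAddColumn_alt (list_data : List (List String)) (col_num : Int) (ref_dict : List (String × String)) : List (List String) :=
  match pvBucketsB (PySem.List.enumerate list_data) col_num PySem.Dict.empty with
  | none => list_data   -- unreached under Pre_: Python raises IndexError in the bucket pass here
  | some b =>
    (pvItemsB ref_dict).foldl (fun st kv => pvInnerB (b.getD kv.1 []) kv.2 st) list_data

-- ===== PRECONDITION & SPEC =====
-- Pre_: every row admits index col_num — exactly where Python A returns (else GetColumn raises IndexError)
def Pre_ReferDictAddColumn (list_data : List (List String)) (col_num : Int) (ref_dict : List (String × String)) : Prop :=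
  ∀ row ∈ list_data, PySem.Raise.InRange row.length col_num
instance (list_data : List (List String)) (col_num : Int) (ref_dict : List (String × String)) : Decidable (Pre_ReferDictAddColumn list_data col_num ref_dict) := by unfold Pre_ReferDictAddColumn; infer_instance
def pvWitness_ReferDictAddColumn : List (List String) × Int × (List (String × String)) := ([["a", "x"], ["b", "y"]], 0, [("a", "A1"), ("c", "C1")])

def Spec_ReferDictAddColumn (list_data : List (List String)) (col_num : Int) (ref_dict : List (String × String)) (out : List (List String)) : Prop := out = ReferDictAddColumn_alt list_data col_num ref_dict
instance (list_data : List (List String)) (col_num : Int) (ref_dict : List (String × String)) (out : List (List String)) : Decidable (Spec_ReferDictAddColumn list_data col_num ref_dict out) := by unfold Spec_ReferDictAddColumn; infer_instance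

-- ===== CLAIM (what is proved, stated in full; the proofs are below) =====
def Claim_equal_ReferDictAddColumn : Prop := ∀ (list_data : List (List String)) (col_num : Int) (ref_dict : List (String × String)), Dom_ReferDictAddColumn list_data col_num ref_dict → Pre_ReferDictAddColumn list_data col_num ref_dict → Spec_ReferDictAddColumn list_data col_num ref_dict (ReferDictAddColumn list_data col_num ref_dict)

-- ===== LEMMAS AND PROOFS =====

-- the per-row result both programs produce, named for the proofs
def pvRowB (col_num : Int) (d : PySem.Dict String String) (row : List String) : List String :=
  match PySem.List.pyGet? row col_num with
  | none => row
  | some e =>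
    match d.get? e with
    | none => row
    | some v => row ++ [v]

-- the key of a row (under Pre_ the pyGet? is some, so the default is never read)
def pvKeyOf (col_num : Int) (row : List String) : String :=
  (PySem.List.pyGet? row col_num).getD ""

lemma pvGet_some {row : List String} {col_num : Int}
    (hr : PySem.Raise.InRange row.length col_num) :
    ∃ e, PySem.List.pyGet? row col_num = some e := by
  rcases ho : PySem.List.pyGet? row col_num with _ | e
  · rw [PySem.List.pyGet?_eq_none_iff] at ho; exact absurd hr ho
  · exact ⟨e, rfl⟩

-- ---------- A-side characterisation (A = map of pvRowB) ----------

lemma getColAux_spec (col_num : Int) :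
    ∀ (data : List (List String)) (acc : List String),
    (∀ row ∈ data, PySem.Raise.InRange row.length col_num) →
    pvGetColAux data col_num acc
      = some (acc ++ data.map (pvKeyOf col_num)) := by
  intro data
  induction data with
  | nil => intro acc _; simp [pvGetColAux]
  | cons row rest ih =>
    intro acc h
    obtain ⟨e, he⟩ := pvGet_some (h row (by simp))
    simp [pvGetColAux, he, pvKeyOf, ih (acc ++ [e]) (fun r hrm => h r (by simp [hrm]))]

lemma loopA_spec (d : PySem.Dict String String) (col_num : Int) :
    ∀ (data done : List (List String)),
    (∀ row ∈ data, PySem.Raise.InRange row.length col_num) →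
    pvLoopA d (done ++ data) (done.length : Int) (data.map (pvKeyOf col_num))
      = done ++ data.map (pvRowB col_num d) := by
  intro data
  induction data with
  | nil => intro done _; simp [pvLoopA]
  | cons row rest ih =>
    intro done h
    obtain ⟨e, he⟩ := pvGet_some (h row (by simp))
    have hkey : pvKeyOf col_num row = e := by simp [pvKeyOf, he]
    have hrest : ∀ r ∈ rest, PySem.Raise.InRange r.length col_num :=
      fun r hrm => h r (by simp [hrm])
    have hcast : ((done.length : Int) + 1) = ((done.length + 1 : Nat) : Int) := by push_cast; ring
    rcases hd : d.get? e with _ | v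
    · have key := ih (done ++ [row]) hrest
      simp only [List.append_assoc, List.singleton_append, List.length_append,
        List.length_cons, List.length_nil, Nat.zero_add] at key
      simp only [List.map_cons, pvLoopA, hkey, hd, hcast, key]
      simp [pvRowB, he, hd]
    · have hget : PySem.List.pyGet? (done ++ row :: rest) (done.length : Int) = some row :=
        PySem.List.pyGet?_append_length done rest row
      have hset : PySem.List.pySetD (done ++ row :: rest) (done.length : Int) (row ++ [v])
          = done ++ (row ++ [v]) :: rest := by
        unfold PySem.List.pySetD
        rw [PySem.List.pySet?_natCast _ _ _ (by simp)]
        simp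
      have key := ih (done ++ [row ++ [v]]) hrest
      simp only [List.append_assoc, List.singleton_append, List.length_append,
        List.length_cons, List.length_nil, Nat.zero_add] at key
      simp only [List.map_cons, pvLoopA, hkey, hd, hget, hset, hcast, key]
      simp [pvRowB, he, hd]

-- ---------- B-side characterisation ----------

-- the (key, index) pairs B's bucket pass distributes
def pvMapped (list_data : List (List String)) (col_num : Int) : List (String × Int) :=
  (PySem.List.enumerate list_data).map (fun p => (pvKeyOf col_num p.2, p.1))

lemma bucketsB_spec (col_num : Int) :
    ∀ (pairs : List (Int × List String)) (b : PySem.Dict String (List Int)),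
    (∀ p ∈ pairs, ∃ e, PySem.List.pyGet? p.2 col_num = some e) →
    pvBucketsB pairs col_num b
      = some ((pairs.map (fun p => (pvKeyOf col_num p.2, p.1))).foldl
          (fun b q => b.modify q.1 [] (· ++ [q.2])) b) := by
  intro pairs
  induction pairs with
  | nil => intro b _; simp [pvBucketsB]
  | cons p rest ih =>
    intro b h
    obtain ⟨e, he⟩ := h p (by simp)
    obtain ⟨i, row⟩ := p
    simp only at he
    simp [pvBucketsB, he, pvKeyOf, ih _ (fun q hq => h q (by simp [hq]))]

-- the bucket of key k
lemma bucket_content (list_data : List (List String)) (col_num : Int) (k : String) :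
    (((pvMapped list_data col_num).foldl
        (fun b q => b.modify q.1 [] (· ++ [q.2])) PySem.Dict.empty).getD k [])
      = (((pvMapped list_data col_num).filter (fun q => q.1 == k)).map (·.2)) := by
  rw [PySem.Dict.getD_foldl_modify_append]
  simp

lemma mem_bucket (list_data : List (List String)) (col_num : Int) (k : String) (j : Nat) :
    ((j : Int) ∈ ((pvMapped list_data col_num).filter (fun q => q.1 == k)).map (·.2))
      ↔ (∃ h : j < list_data.length, pvKeyOf col_num list_data[j] = k) := by
  simp only [pvMapped, List.mem_map, List.mem_filter, List.mem_map,
    PySem.List.mem_enumerate_iff]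
  constructor
  · rintro ⟨q, ⟨⟨p, ⟨m, hm, rfl⟩, rfl⟩, hk⟩, hj⟩
    simp only at hk hj
    have : m = j := by omega
    subst this
    exact ⟨hm, by simpa using hk⟩
  · rintro ⟨hj, hk⟩
    exact ⟨(pvKeyOf col_num list_data[j], (j : Int)),
      ⟨⟨((j : Int), list_data[j]), ⟨j, hj, by simp⟩, rfl⟩, by simpa using hk⟩, rfl⟩

lemma bucket_nodup (list_data : List (List String)) (col_num : Int) (k : String) :
    (((pvMapped list_data col_num).filter (fun q => q.1 == k)).map (·.2)).Nodup := by
  have h1 : (PySem.List.enumerate list_data).Pairwise (fun p q => p.1 < q.1) :=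
    PySem.List.pairwise_lt_enumerate list_data 0
  have h2 : (pvMapped list_data col_num).Pairwise (fun a b => a.2 < b.2) := by
    exact List.Pairwise.map _ (fun a b hab => hab) h1
  have h3 : ((pvMapped list_data col_num).filter (fun q => q.1 == k)).Pairwise
      (fun a b => a.2 < b.2) := List.Pairwise.sublist List.filter_sublist h2
  exact List.pairwise_map.mpr (h3.imp fun hab => ne_of_lt hab)

lemma inner_length (v : String) :
    ∀ (S : List Int) (st : List (List String)), (pvInnerB S v st).length = st.length := by
  intro S
  induction S with
  | nil => intro st; simp [pvInnerB]
  | cons i S ih =>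
    intro st
    simp only [pvInnerB, List.foldl_cons] at *
    rw [ih]
    exact PySem.List.length_pySetD _ _ _

lemma inner_get? (v : String) :
    ∀ (S : List Int) (st : List (List String)) (j : Nat),
    (∀ i ∈ S, 0 ≤ i ∧ i < st.length) → S.Nodup → j < st.length →
    (pvInnerB S v st)[j]? = if (j : Int) ∈ S then st[j]?.map (· ++ [v]) else st[j]? := by
  intro S
  induction S with
  | nil => intro st j _ _ _; simp [pvInnerB]
  | cons i S ih =>
    intro st j hrange hnd hj
    obtain ⟨hi0, hilt⟩ := hrange i (by simp)
    have hset : PySem.List.pySetD st i (PySem.List.pyGetD st i [] ++ [v])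
        = st.set i.toNat (st[i.toNat] ++ [v]) := by
      rw [PySem.List.pyGetD_eq_getElem st [] hi0 (by exact_mod_cast hilt),
        PySem.List.pySetD_of_nonneg st _ hi0]
    have hlen' : (st.set i.toNat (st[i.toNat] ++ [v])).length = st.length := by simp
    have hrest : ∀ x ∈ S, 0 ≤ x ∧ x < ((st.set i.toNat (st[i.toNat] ++ [v])).length : Int) := by
      intro x hx; rw [hlen']; exact hrange x (by simp [hx])
    simp only [pvInnerB, List.foldl_cons] at *
    rw [hset, ih _ j hrest hnd.of_cons (by omega)]
    by_cases hji : (j : Int) = i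
    · have hjt : i.toNat = j := by omega
      have hiS : i ∉ S := (List.nodup_cons.mp hnd).1
      have hjS : (j : Int) ∉ S := by rw [hji]; exact hiS
      subst hjt
      simp [hji, hiS, hj]
    · have : i.toNat ≠ j := by omega
      simp [List.getElem?_set_ne this, hji]

lemma outer_length (b : PySem.Dict String (List Int)) :
    ∀ (items : List (String × String)) (st : List (List String)),
    (items.foldl (fun st kv => pvInnerB (b.getD kv.1 []) kv.2 st) st).length = st.length := by
  intro items
  induction items with
  | nil => intro st; simp
  | cons kv rest ih => intro st; simp only [List.foldl_cons]; rw [ih, inner_length]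

-- ---------- glue ----------

lemma find?_eq_get? :
    ∀ (d : PySem.Dict String String) (k : String), d.keys.Nodup →
    (d.items.find? (fun kv => kv.1 == k)).map (·.2) = d.get? k := by
  intro d k hnd
  rcases hg : d.get? k with _ | v
  · rw [List.find?_eq_none.mpr, Option.map_none]
    intro kv hkv hbeq
    have hk1 : kv.1 = k := by simpa using hbeq
    exact absurd (hk1 ▸ PySem.Dict.mem_keys_of_mem_items d hkv)
      ((PySem.Dict.get?_eq_none_iff_not_mem_keys d k).mp hg)
  · have hmem : (k, v) ∈ d.items := PySem.Dict.mem_items_of_get?_eq_some d hg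
    rcases hf : d.items.find? (fun kv => kv.1 == k) with _ | kv
    · rw [List.find?_eq_none] at hf
      exact absurd (by simp) (hf _ hmem)
    · have hkv : kv ∈ d.items := List.mem_of_find?_eq_some hf
      have hk1 : kv.1 = k := by simpa using List.find?_some hf
      have hkv' : (kv.1, kv.2) ∈ d.items := by simpa using hkv
      have hthis : d.get? kv.1 = some kv.2 := PySem.Dict.get?_of_mem_items d hkv' hnd
      rw [hk1, hg] at hthis
      have hv : kv.2 = v := (Option.some.inj hthis).symm
      rw [hf]
      simp only [Option.map_some]
      refine congrArg some ?_
      exact hv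

lemma setfold_get? (k : String) :
    ∀ (rd : List (String × String)) (d : PySem.Dict String String),
    (rd.foldl (fun d p => d.setdefault p.1 p.2) d).get? k
      = (d.get? k).or ((PySem.Dict.mk rd).get? k) := by
  intro rd
  induction rd with
  | nil => intro d; simp [PySem.Dict.get?]
  | cons p rest ih =>
    intro d
    simp only [List.foldl_cons]
    rw [ih, PySem.Dict.get?_mk_cons]
    by_cases hk : k = p.1
    · subst hk
      rw [PySem.Dict.get?_setdefault_self d p.1 p.2]
      rcases d.get? p.1 with _ | v <;> simp
    · rw [PySem.Dict.get?_setdefault_of_ne d p.2 hk]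
      simp [show (p.1 == k) = false by simpa using Ne.symm hk]

lemma setfold_nodup_keys :
    ∀ (rd : List (String × String)) (d : PySem.Dict String String), d.keys.Nodup →
    (rd.foldl (fun d p => d.setdefault p.1 p.2) d).keys.Nodup := by
  intro rd
  induction rd with
  | nil => intro d h; simpa
  | cons p rest ih =>
    intro d h
    simp only [List.foldl_cons]
    apply ih
    by_cases hc : d.contains p.1
    · rw [PySem.Dict.setdefault_of_contains _ _ hc]; exact h
    · rw [PySem.Dict.setdefault_of_not_contains _ _ (by simpa using hc)]
      exact PySem.Dict.nodup_keys_insert _ _ _ h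

-- the whole of B's second stage, pointwise
lemma outer_get? (list_data : List (List String)) (col_num : Int)
    (b : PySem.Dict String (List Int))
    (hb : ∀ k, b.getD k [] = ((pvMapped list_data col_num).filter (fun q => q.1 == k)).map (·.2)) :
    ∀ (items : List (String × String)) (st : List (List String)),
    st.length = list_data.length → (items.map (·.1)).Nodup →
    ∀ (j : Nat) (hj : j < list_data.length),
    (items.foldl (fun st kv => pvInnerB (b.getD kv.1 []) kv.2 st) st)[j]?
      = ((items.find? (fun kv => kv.1 == pvKeyOf col_num list_data[j])).elim
          st[j]? (fun kv => st[j]?.map (· ++ [kv.2]))) := by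
  intro items
  induction items with
  | nil => intro st _ _ j hj; simp
  | cons kv rest ih =>
    intro st hlen hnd j hj
    have hrange : ∀ i ∈ b.getD kv.1 [], 0 ≤ i ∧ i < (st.length : Int) := by
      intro i hi
      rw [hb] at hi
      simp only [pvMapped, List.mem_map, List.mem_filter,
        PySem.List.mem_enumerate_iff] at hi
      obtain ⟨q, ⟨⟨p, ⟨m, hm, rfl⟩, rfl⟩, _⟩, rfl⟩ := hi
      simp only
      omega
    have hbnd : (b.getD kv.1 []).Nodup := by rw [hb]; exact bucket_nodup _ _ _
    have hlen' : (pvInnerB (b.getD kv.1 []) kv.2 st).length = st.length := inner_length _ _ _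
    simp only [List.foldl_cons]
    rw [ih _ (by rw [hlen']; exact hlen) (by simpa using hnd.of_cons) j hj]
    rw [inner_get? kv.2 _ st j hrange hbnd (by omega)]
    rw [hb, List.find?_cons]
    by_cases hk : kv.1 = pvKeyOf col_num list_data[j]
    · have hmem : (j : Int) ∈ ((pvMapped list_data col_num).filter (fun q => q.1 == kv.1)).map (·.2) := by
        rw [mem_bucket]; exact ⟨hj, hk.symm⟩
      have hnotrest : rest.find? (fun kv' => kv'.1 == pvKeyOf col_num list_data[j]) = none := by
        rw [List.find?_eq_none]
        intro kv' hkv' hbeq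
        have h1 : kv'.1 = kv.1 := by rw [hk]; simpa using hbeq
        have : kv.1 ∉ rest.map (·.1) := (List.nodup_cons.mp (by simpa using hnd)).1
        exact this (h1 ▸ List.mem_map_of_mem hkv')
      rw [hnotrest]
      simp only [Option.elim]
      rw [if_pos hmem]
      simp [hk]
    · have hnmem : (j : Int) ∉ ((pvMapped list_data col_num).filter (fun q => q.1 == kv.1)).map (·.2) := by
        rw [mem_bucket]; rintro ⟨_, hkk⟩; exact hk hkk.symm
      simp [hnmem, show (kv.1 == pvKeyOf col_num list_data[j]) = false by simpa using hk]

-- B = map of pvRowB too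
lemma altB_spec (list_data : List (List String)) (col_num : Int) (ref_dict : List (String × String))
    (hpre : ∀ row ∈ list_data, PySem.Raise.InRange row.length col_num) :
    ReferDictAddColumn_alt list_data col_num ref_dict
      = list_data.map (pvRowB col_num (PySem.Dict.mk ref_dict)) := by
  have hen : ∀ p ∈ PySem.List.enumerate list_data, ∃ e, PySem.List.pyGet? p.2 col_num = some e := by
    intro p hp
    simp only [PySem.List.mem_enumerate_iff] at hp
    obtain ⟨m, hm, rfl⟩ := hp
    exact pvGet_some (hpre _ (by simp))
  unfold ReferDictAddColumn_alt
  rw [bucketsB_spec col_num _ _ hen]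
  set D := ref_dict.foldl (fun d p => d.setdefault p.1 p.2) PySem.Dict.empty with hD
  have hDnd : D.keys.Nodup := setfold_nodup_keys ref_dict _ (by simp)
  have hDget : ∀ k, D.get? k = (PySem.Dict.mk ref_dict).get? k := by
    intro k; rw [hD, setfold_get? k ref_dict PySem.Dict.empty]; simp
  have hitems : (D.items.map (·.1)).Nodup := hDnd
  have hb : ∀ k,
      (((pvMapped list_data col_num).foldl (fun b q => b.modify q.1 [] (· ++ [q.2]))
        PySem.Dict.empty).getD k [])
      = ((pvMapped list_data col_num).filter (fun q => q.1 == k)).map (·.2) :=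
    fun k => bucket_content list_data col_num k
  apply List.ext_getElem?
  intro j
  by_cases hj : j < list_data.length
  · rw [show (PySem.List.enumerate list_data).map (fun p => (pvKeyOf col_num p.2, p.1))
        = pvMapped list_data col_num from rfl]
    rw [outer_get? list_data col_num _ hb (pvItemsB ref_dict) list_data rfl
      (by simpa [pvItemsB] using hitems) j hj]
    have hfind : ((pvItemsB ref_dict).find? (fun kv => kv.1 == pvKeyOf col_num list_data[j])).map (·.2)
        = (PySem.Dict.mk ref_dict).get? (pvKeyOf col_num list_data[j]) := by
      rw [← hDget]
      exact find?_eq_get? D _ hDnd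
    obtain ⟨e, he⟩ := pvGet_some (hpre list_data[j] (by simp))
    have hkey : pvKeyOf col_num list_data[j] = e := by simp [pvKeyOf, he]
    rcases hf : (pvItemsB ref_dict).find? (fun kv => kv.1 == pvKeyOf col_num list_data[j]) with _ | kv
    · rw [hf] at hfind
      simp only [Option.map_none] at hfind
      rw [hf]
      simp only [Option.elim]
      rw [List.getElem?_map]
      simp [pvRowB, he, ← hkey, ← hfind, List.getElem?_eq_getElem hj]
    · rw [hf] at hfind
      simp only [Option.map_some] at hfind
      rw [hf]
      simp only [Option.elim]
      rw [List.getElem?_map]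
      simp [pvRowB, he, ← hkey, ← hfind, List.getElem?_eq_getElem hj]
  · have h1 : (list_data.map (pvRowB col_num (PySem.Dict.mk ref_dict)))[j]? = none := by
      rw [List.getElem?_eq_none]; simpa using (by omega : list_data.length ≤ j)
    have h2 : ((pvItemsB ref_dict).foldl
        (fun st kv => pvInnerB ((((pvMapped list_data col_num).foldl
          (fun b q => b.modify q.1 [] (· ++ [q.2])) PySem.Dict.empty)).getD kv.1 []) kv.2 st)
        list_data)[j]? = none := by
      rw [List.getElem?_eq_none]
      rw [outer_length]
      omega
    rw [show (PySem.List.enumerate list_data).map (fun p => (pvKeyOf col_num p.2, p.1))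
        = pvMapped list_data col_num from rfl]
    rw [h1, h2]

-- ===== VERDICT (by name: the statement is the Claim_ definition above) =====
theorem ReferDictAddColumn_spec : Claim_equal_ReferDictAddColumn := by
  intro list_data col_num ref_dict _ hpre
  unfold Spec_ReferDictAddColumn ReferDictAddColumn
  rw [getColAux_spec col_num list_data [] hpre]
  have key := loopA_spec (PySem.Dict.mk ref_dict) col_num list_data [] hpre
  simp only [List.nil_append, List.length_nil, Int.natCast_zero] at key
  simp only [List.nil_append, key]
  exact (altB_spec list_data col_num ref_dict hpre).symm
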